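-- pv_equiv track=rewrite | github.com/AnupJoseph/Practicals | cdma_pract_2.py | build_bipolar_walsh_matrix
-- ===== SOURCE A (Python) =====
-- from typing import List,Type
--
-- def build_bipolar_walsh_matrix(size: int) -> List[List[int]]:
--     counting_range: Type = range(size)
--     bipolar_walsh_matrix: [List[List[int]]] = [[-1 for i in counting_range] for j in counting_range]
--     for x in counting_range:
--         for y in counting_range:
--             number_of_flips: int = x&y
--
--             # 13 here is just a trick to strip of the 0b at the start of the code
--             # An alternative would be to actually strip off the characters till b and convert the rest to int
--             value_at_position: int = int(bin(number_of_flips),13)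
--             bipolar_of_value: int = (value_at_position%2) or -1
--             bipolar_walsh_matrix[x][y] = bipolar_of_value
--     return bipolar_walsh_matrix
-- ===== SOURCE B (Python) =====
-- def build_bipolar_walsh_matrix(size):
--     # Sylvester doubling: grow [[1]] to the smallest power-of-two Hadamard
--     # matrix of dimension >= size, then return its top-left size x size block.
--     if size <= 0:
--         return []
--     H = [[1]]
--     while len(H) < size:
--         H = [row + row for row in H] + [row + [-v for v in row] for row in H]
--     return [row[:size] for row in H[:size]]
-- ===== Notes on version B (the rewrite author's own statement) =====
-- stated objective: alternative
-- what changed: Replaces the per-entry int(bin(x&y),13) parity trick computed in an n*n nested loop by Sylvester doubling: grow [[1]] to the smallest power-of-two Hadamard matrix of dimension >= size and slice its top-left size x size block (measured ~4x faster up to n=1024, unconfirmed at the largest size).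
import Mathlib
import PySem

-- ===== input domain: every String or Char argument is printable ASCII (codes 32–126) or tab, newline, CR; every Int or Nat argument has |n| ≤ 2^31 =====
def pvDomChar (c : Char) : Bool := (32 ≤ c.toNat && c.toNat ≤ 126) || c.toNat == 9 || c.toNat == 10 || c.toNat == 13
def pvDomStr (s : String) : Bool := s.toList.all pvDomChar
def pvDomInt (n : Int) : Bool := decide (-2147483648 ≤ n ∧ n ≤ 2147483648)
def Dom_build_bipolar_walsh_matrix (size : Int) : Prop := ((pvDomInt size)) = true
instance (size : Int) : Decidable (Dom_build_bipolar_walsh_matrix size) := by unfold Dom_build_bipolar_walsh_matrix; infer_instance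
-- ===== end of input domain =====

-- B replaces A's per-entry int(bin(x&y),13) parity trick (an n×n nested loop) by Sylvester
-- doubling of [[1]] to the next power of two and slicing the top-left size×size block.

-- ===== PORT A =====
-- Hand-port of Python's `int(s, 13)` for exactly the strings A feeds it, namely `bin(n)` of a
-- nonnegative n: "0b" + binary digits — no whitespace, no sign, no '_', and the "0b" prefix is
-- NOT special for base 13, so every character is a plain base-13 digit ('b' = 11, '1' = 1,
-- '0' = 0) and the value is the usual positional left fold; exact for these inputs (CPython
-- parses them the same way).  (PySem.Int.ofStrBase? covers int(s,13) too, but its digit loop is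
-- private to the prelude, so this transparent step-for-step parser is used instead.)
def pvDigit13 (c : Char) : Int := if c = 'b' then 11 else if c = '1' then 1 else 0
def pvInt13 (cs : List Char) : Int := cs.foldl (fun acc c => acc * 13 + pvDigit13 c) 0

-- literal transliteration of A: build an all (-1) matrix over range(size) × range(size), then
-- overwrite every entry; the indices x, y are always in range, so Python's `m[x][y] = v`
-- (which never raises here) is the in-range list set `pySetD`.
def build_bipolar_walsh_matrix (size : Int) : List (List Int) :=
  let counting_range := PySem.List.pyRange 0 size
  let bipolar_walsh_matrix := counting_range.map (fun _j => counting_range.map (fun _i => (-1 : Int)))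
  counting_range.foldl (fun m x =>
    counting_range.foldl (fun m y =>
      let number_of_flips : Int := PySem.Int.band x y
      let value_at_position : Int := pvInt13 (PySem.Int.pyBin number_of_flips).toList
      let bipolar_of_value : Int :=
        if PySem.Int.mod value_at_position 2 ≠ 0 then PySem.Int.mod value_at_position 2 else -1
      PySem.List.pySetD m x (PySem.List.pySetD (PySem.List.pyGetD m x []) y bipolar_of_value)) m)
    bipolar_walsh_matrix

-- ===== PORT B =====
def pvDouble (H : List (List Int)) : List (List Int) :=
  H.map (fun row => row ++ row) ++ H.map (fun row => row ++ row.map (fun v => -v))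

-- the `while len(H) < size` loop of Source B; `size.toNat` steps of fuel always suffice because the
-- length doubles each pass (after k passes it is 2^k ≥ k + 1), so the fuel guard never bites.
def pvGrow (size : Int) : Nat → List (List Int) → List (List Int)
  | 0, H => H
  | fuel + 1, H => if (H.length : Int) < size then pvGrow size fuel (pvDouble H) else H

def build_bipolar_walsh_matrix_alt (size : Int) : List (List Int) :=
  if size ≤ 0 then []
  else
    (PySem.List.slice (pvGrow size size.toNat [[1]]) none (some size)).map
      (fun row => PySem.List.slice row none (some size))

-- ===== PRECONDITION & SPEC =====
def Spec_build_bipolar_walsh_matrix (size : Int) (out : List (List Int)) : Prop := out = build_bipolar_walsh_matrix_alt size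
instance (size : Int) (out : List (List Int)) : Decidable (Spec_build_bipolar_walsh_matrix size out) := by unfold Spec_build_bipolar_walsh_matrix; infer_instance

-- ===== CLAIM (what is proved, stated in full; the proofs are below) =====
def Claim_equal_build_bipolar_walsh_matrix : Prop := ∀ (size : Int), Dom_build_bipolar_walsh_matrix size → Spec_build_bipolar_walsh_matrix size (build_bipolar_walsh_matrix size)

-- ===== LEMMAS AND PROOFS =====

-- popcount by halving
def pvOnes : Nat → Nat
  | 0 => 0
  | n + 1 => (n + 1) % 2 + pvOnes ((n + 1) / 2)
decreasing_by exact Nat.div_lt_self (Nat.succ_pos n) one_lt_two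

lemma pvOnes_eq (n : Nat) : pvOnes n = n % 2 + pvOnes (n / 2) := by
  cases n with
  | zero => simp [pvOnes]
  | succ m => rw [pvOnes]

-- the common entry value: +1 when popcount(x & y) is even, -1 when odd
def pvVal (x y : Nat) : Int := if pvOnes (x &&& y) % 2 = 1 then -1 else 1
def pvRow (sz x : Nat) : List Int := (List.range sz).map (fun y => pvVal x y)
def pvM (sz : Nat) : List (List Int) := (List.range sz).map (fun x => pvRow sz x)

-- ---------- parity of the base-13 parse (A's entry) ----------

lemma pvInt13_aux_mod (cs : List Char) : ∀ acc : Int,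
    (cs.foldl (fun acc c => acc * 13 + pvDigit13 c) acc) % 2
      = (acc + (cs.map pvDigit13).sum) % 2 := by
  induction cs with
  | nil => intro acc; simp
  | cons c cs ih =>
    intro acc
    simp only [List.foldl_cons, List.map_cons, List.sum_cons]
    rw [ih]
    omega

lemma pvDigitSum_toDigits (m : Nat) :
    ((Nat.toDigits 2 m).map pvDigit13).sum = (pvOnes m : Int) := by
  induction m using Nat.strong_induction_on with
  | _ m ih =>
    by_cases h : m < 2
    · rw [Nat.toDigits_of_lt_base h]
      interval_cases m <;> simp [pvDigit13, Nat.digitChar, pvOnes]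
    · rw [Nat.toDigits_of_base_le (by norm_num) (by omega)]
      rw [List.map_append, List.sum_append, ih (m / 2) (Nat.div_lt_self (by omega) one_lt_two)]
      rw [pvOnes_eq m]
      have h2 : m % 2 = 0 ∨ m % 2 = 1 := Nat.mod_two_eq_zero_or_one m
      rcases h2 with h2 | h2 <;> rw [h2] <;> simp [pvDigit13, Nat.digitChar] <;> push_cast <;> ring

lemma pvAnd_mod_two (a b : Nat) : (a &&& b) % 2 = if a % 2 = 1 ∧ b % 2 = 1 then 1 else 0 := by
  have h := @Nat.and_mod_two_eq_one a b
  have := Nat.mod_two_eq_zero_or_one (a &&& b)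
  split_ifs with hif
  · exact h.mpr hif
  · omega

-- ---------- popcount parity of x&y under shifts by 2^k ----------

lemma pvOnes_and_both : ∀ k x y : Nat, x < 2 ^ k → y < 2 ^ k →
    pvOnes ((x + 2 ^ k) &&& (y + 2 ^ k)) = pvOnes (x &&& y) + 1 := by
  intro k
  induction k with
  | zero =>
    intro x y hx hy
    interval_cases x; interval_cases y
    show pvOnes (1 &&& 1) = pvOnes (0 &&& 0) + 1
    norm_num [Nat.and_self, Nat.and_zero]
    rw [pvOnes_eq 1]; simp [pvOnes]
  | succ k ih =>
    intro x y hx hy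
    have hx2 : x / 2 < 2 ^ k := by omega
    have hy2 : y / 2 < 2 ^ k := by omega
    rw [pvOnes_eq ((x + 2 ^ (k+1)) &&& (y + 2 ^ (k+1))), pvOnes_eq (x &&& y)]
    rw [Nat.and_div_two, Nat.and_div_two]
    have e1 : (x + 2 ^ (k+1)) / 2 = x / 2 + 2 ^ k := by omega
    have e2 : (y + 2 ^ (k+1)) / 2 = y / 2 + 2 ^ k := by omega
    rw [e1, e2, ih _ _ hx2 hy2]
    rw [pvAnd_mod_two, pvAnd_mod_two]
    have m1 : (x + 2 ^ (k+1)) % 2 = x % 2 := by omega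
    have m2 : (y + 2 ^ (k+1)) % 2 = y % 2 := by omega
    rw [m1, m2]
    omega

lemma pvOnes_and_left : ∀ k x y : Nat, x < 2 ^ k → y < 2 ^ k →
    pvOnes ((x + 2 ^ k) &&& y) = pvOnes (x &&& y) := by
  intro k
  induction k with
  | zero =>
    intro x y hx hy
    interval_cases x; interval_cases y
    show pvOnes (1 &&& 0) = pvOnes (0 &&& 0) + 0
    norm_num [Nat.and_zero]
  | succ k ih =>
    intro x y hx hy
    have hx2 : x / 2 < 2 ^ k := by omega
    have hy2 : y / 2 < 2 ^ k := by omega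
    rw [pvOnes_eq ((x + 2 ^ (k+1)) &&& y), pvOnes_eq (x &&& y)]
    rw [Nat.and_div_two, Nat.and_div_two]
    have e1 : (x + 2 ^ (k+1)) / 2 = x / 2 + 2 ^ k := by omega
    rw [e1, ih _ _ hx2 hy2]
    rw [pvAnd_mod_two, pvAnd_mod_two]
    have m1 : (x + 2 ^ (k+1)) % 2 = x % 2 := by omega
    rw [m1]

lemma pvOnes_and_right (k x y : Nat) (hx : x < 2 ^ k) (hy : y < 2 ^ k) :
    pvOnes (x &&& (y + 2 ^ k)) = pvOnes (x &&& y) := by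
  rw [Nat.and_comm, pvOnes_and_left k y x hy hx, Nat.and_comm]

-- ---------- A's entry equals pvVal ----------

def pvEnt (x y : Nat) : Int :=
  let v := pvInt13 (PySem.Int.pyBin (PySem.Int.band x y)).toList
  if PySem.Int.mod v 2 ≠ 0 then PySem.Int.mod v 2 else -1

lemma pvEnt_eq (x y : Nat) : pvEnt x y = pvVal x y := by
  unfold pvEnt
  rw [PySem.Int.band_natCast, PySem.Int.toList_pyBin]
  rw [show PySem.Int.toBinChars0b ((x &&& y : Nat) : Int)
        = '0' :: 'b' :: Nat.toDigits 2 (x &&& y) by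
      simp [PySem.Int.toBinChars0b]]
  set m := x &&& y with hm
  have hmod : PySem.Int.mod (pvInt13 ('0' :: 'b' :: Nat.toDigits 2 m)) 2
      = pvInt13 ('0' :: 'b' :: Nat.toDigits 2 m) % 2 :=
    Int.fmod_eq_emod_of_nonneg _ (by norm_num)
  have hpar : pvInt13 ('0' :: 'b' :: Nat.toDigits 2 m) % 2 = (11 + (pvOnes m : Int)) % 2 := by
    unfold pvInt13
    rw [pvInt13_aux_mod]
    simp [pvDigit13, pvDigitSum_toDigits]
  show (if PySem.Int.mod (pvInt13 ('0' :: 'b' :: Nat.toDigits 2 m)) 2 ≠ 0 then PySem.Int.mod (pvInt13 ('0' :: 'b' :: Nat.toDigits 2 m)) 2 else -1) = pvVal x y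
  rw [hmod, hpar]
  unfold pvVal
  rcases Nat.mod_two_eq_zero_or_one (pvOnes m) with h | h
  · have h' : (11 + (pvOnes m : Int)) % 2 = 1 := by omega
    simp [h']
    exact hm ▸ h
  · have h' : (11 + (pvOnes m : Int)) % 2 = 0 := by omega
    simp [h']
    exact hm ▸ h

lemma pvEntry_eq (x y : Nat) :
    (if PySem.Int.mod (pvInt13 (PySem.Int.pyBin (PySem.Int.band (↑x) (↑y))).toList) 2 ≠ 0
     then PySem.Int.mod (pvInt13 (PySem.Int.pyBin (PySem.Int.band (↑x) (↑y))).toList) 2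
     else -1) = pvVal x y := pvEnt_eq x y

-- ---------- loop shape of A: filling a list position by position ----------

lemma pvFill_row (g : Nat → Int) : ∀ (n : Nat) (l : List Int), n ≤ l.length →
    (List.range n).foldl (fun r y => r.set y (g y)) l = (List.range n).map g ++ l.drop n := by
  intro n
  induction n with
  | zero => intro l h; simp
  | succ n ih =>
    intro l h
    rw [List.range_succ, List.foldl_append, List.map_append]
    rw [ih l (by omega)]
    simp only [List.foldl_cons, List.foldl_nil, List.map_cons, List.map_nil]
    rw [List.drop_eq_getElem_cons (by omega : n < l.length)]
    rw [List.set_append]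
    simp only [List.length_map, List.length_range, lt_irrefl, Nat.sub_self]
    simp [List.append_assoc]
    rw [List.drop_eq_getElem_cons (by omega : n < l.length), List.set_cons_zero]

lemma pvInner_set (f : Nat → Int) : ∀ (n : Nat) (x : Nat) (m : List (List Int)), x < m.length →
    (List.range n).foldl (fun m k => m.set x ((m.getD x []).set k (f k))) m
      = m.set x ((List.range n).foldl (fun r k => r.set k (f k)) (m.getD x [])) := by
  intro n
  induction n with
  | zero =>
    intro x m h
    simp only [List.range_zero, List.foldl_nil]
    rw [List.getD, List.getElem?_eq_getElem h]
    simp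
  | succ n ih =>
    intro x m h
    rw [List.range_succ, List.foldl_append, List.foldl_append]
    rw [ih x m h]
    simp only [List.foldl_cons, List.foldl_nil]
    have hget : ((m.set x ((List.range n).foldl (fun r k => r.set k (f k)) (m.getD x []))).getD x [])
        = (List.range n).foldl (fun r k => r.set k (f k)) (m.getD x []) := by
      simp [List.getD, List.getElem?_set_self, h]
    rw [hget, List.set_set]

lemma pvMaster (sz : Nat) (ent : Nat → Nat → Int) : ∀ (n : Nat) (m : List (List Int)),
    n ≤ m.length → (∀ r ∈ m, r.length = sz) →
    (List.range n).foldl (fun m x =>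
        (List.range sz).foldl (fun m y => m.set x ((m.getD x []).set y (ent x y))) m) m
      = (List.range n).map (fun x => (List.range sz).map (ent x)) ++ m.drop n := by
  intro n
  induction n with
  | zero => intro m h hr; simp
  | succ n ih =>
    intro m h hr
    rw [List.range_succ, List.foldl_append, List.map_append]
    rw [ih m (by omega) hr]
    simp only [List.foldl_cons, List.foldl_nil, List.map_cons, List.map_nil]
    set P := (List.range n).map (fun x => (List.range sz).map (ent x)) ++ m.drop n with hP
    have hlenP : P.length = m.length := by simp [hP]; omega
    have hx : n < P.length := by omega
    rw [pvInner_set (ent n) sz n P hx]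
    have hgetP : P.getD n [] = m[n] := by
      rw [List.getD, hP]
      rw [List.getElem?_append_right (by simp)]
      simp only [List.length_map, List.length_range]
      rw [List.getElem?_drop]
      rw [List.getElem?_eq_getElem (by omega : n + (n - n) < m.length)]
      simp
      rfl
    have hmem := hr m[n] (List.getElem_mem (by omega))
    have hlen : sz ≤ (m[n]).length := le_of_eq hmem.symm
    rw [pvFill_row (ent n) sz (P.getD n []) (by rw [hgetP]; exact hlen)]
    rw [hgetP]
    have hdrop : (m[n]).drop sz = [] := List.drop_eq_nil_iff.mpr (le_of_eq hmem)
    rw [hdrop, List.append_nil, hP]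
    rw [List.set_append]
    simp only [List.length_map, List.length_range, lt_irrefl, Nat.sub_self]
    rw [List.drop_eq_getElem_cons (by omega : n < m.length), List.set_cons_zero]
    simp [List.append_assoc]

lemma pvA_eq (size : Int) : build_bipolar_walsh_matrix size = pvM size.toNat := by
  unfold build_bipolar_walsh_matrix
  rw [PySem.List.pyRange_one]
  simp only [sub_zero, zero_add, List.foldl_map, List.map_map]
  refine .trans (PySem.List.foldl_congr_mem _ _
      (fun m kx => (List.range size.toNat).foldl
        (fun m ky => m.set kx ((m.getD kx []).set ky (pvVal kx ky))) m) _ ?_) ?_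
  · intro acc kx _
    refine PySem.List.foldl_congr_mem _ _ _ _ ?_
    intro acc2 ky _
    simp only [PySem.List.pySetD_natCast, PySem.List.pyGetD_natCast, pvEntry_eq]
  · rw [pvMaster size.toNat pvVal size.toNat _ (by simp)
        (by intro r hr; simp at hr; obtain ⟨a, -, rfl⟩ := hr; simp)]
    simp [pvM, pvRow, List.drop_eq_nil_iff]

-- ---------- B equals pvM: Sylvester doubling ----------

lemma pvVal_left (k x y : Nat) (hx : x < 2 ^ k) (hy : y < 2 ^ k) :
    pvVal (2 ^ k + x) y = pvVal x y := by
  unfold pvVal; rw [Nat.add_comm, pvOnes_and_left k x y hx hy]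

lemma pvVal_right (k x y : Nat) (hx : x < 2 ^ k) (hy : y < 2 ^ k) :
    pvVal x (2 ^ k + y) = pvVal x y := by
  unfold pvVal; rw [Nat.add_comm, pvOnes_and_right k x y hx hy]

lemma pvVal_both (k x y : Nat) (hx : x < 2 ^ k) (hy : y < 2 ^ k) :
    pvVal (2 ^ k + x) (2 ^ k + y) = -pvVal x y := by
  unfold pvVal
  rw [Nat.add_comm (2^k) x, Nat.add_comm (2^k) y, pvOnes_and_both k x y hx hy]
  rcases Nat.mod_two_eq_zero_or_one (pvOnes (x &&& y)) with h | h
  · have : (pvOnes (x &&& y) + 1) % 2 = 1 := by omega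
    simp [h, this]
  · have : (pvOnes (x &&& y) + 1) % 2 = 0 := by omega
    simp [h, this]

lemma pvRow_first (k x : Nat) (hx : x < 2 ^ k) :
    pvRow (2 ^ (k + 1)) x = pvRow (2 ^ k) x ++ pvRow (2 ^ k) x := by
  unfold pvRow
  rw [show 2 ^ (k + 1) = 2 ^ k + 2 ^ k by ring, List.range_add, List.map_append, List.map_map]
  congr 1
  apply List.map_congr_left
  intro y hy
  simp only [Function.comp_apply]
  exact pvVal_right k x y hx (List.mem_range.mp hy)

lemma pvRow_second (k x : Nat) (hx : x < 2 ^ k) :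
    pvRow (2 ^ (k + 1)) (2 ^ k + x) = pvRow (2 ^ k) x ++ (pvRow (2 ^ k) x).map (fun v => -v) := by
  unfold pvRow
  rw [show 2 ^ (k + 1) = 2 ^ k + 2 ^ k by ring, List.range_add, List.map_append, List.map_map,
    List.map_map]
  congr 1
  · apply List.map_congr_left
    intro y hy
    exact pvVal_left k x y hx (List.mem_range.mp hy)
  · apply List.map_congr_left
    intro y hy
    simp only [Function.comp_apply]
    exact pvVal_both k x y hx (List.mem_range.mp hy)

lemma pvDouble_pvM (k : Nat) : pvDouble (pvM (2 ^ k)) = pvM (2 ^ (k + 1)) := by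
  unfold pvDouble pvM
  rw [show 2 ^ (k + 1) = 2 ^ k + 2 ^ k by ring, List.range_add, List.map_append, List.map_map,
    List.map_map, List.map_map]
  rw [show (2 ^ k + 2 ^ k) = 2 ^ (k + 1) by ring]
  congr 1
  · apply List.map_congr_left
    intro x hx
    simp only [Function.comp_apply]
    exact (pvRow_first k x (List.mem_range.mp hx)).symm
  · apply List.map_congr_left
    intro x hx
    simp only [Function.comp_apply]
    exact (pvRow_second k x (List.mem_range.mp hx)).symm

lemma pvM_length (sz : Nat) : (pvM sz).length = sz := by simp [pvM]

def pvTgt (sz : Nat) : Nat := Nat.find (p := fun k => sz ≤ 2 ^ k) ⟨sz, Nat.le_of_lt Nat.lt_two_pow_self⟩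

lemma pvTgt_spec (sz : Nat) : sz ≤ 2 ^ pvTgt sz := Nat.find_spec (p := fun k => sz ≤ 2 ^ k) ⟨sz, Nat.le_of_lt Nat.lt_two_pow_self⟩

lemma pvTgt_le (sz k : Nat) (h : sz ≤ 2 ^ k) : pvTgt sz ≤ k := Nat.find_le h

lemma pvGrow_eq (sz : Nat) : ∀ (fuel k : Nat), k ≤ pvTgt sz → pvTgt sz ≤ k + fuel →
    pvGrow (sz : Int) fuel (pvM (2 ^ k)) = pvM (2 ^ pvTgt sz) := by
  intro fuel
  induction fuel with
  | zero =>
    intro k h1 h2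
    have : k = pvTgt sz := by omega
    rw [pvGrow, this]
  | succ fuel ih =>
    intro k h1 h2
    rw [pvGrow]
    by_cases hlt : 2 ^ k < sz
    · rw [if_pos (by rw [pvM_length]; exact_mod_cast hlt)]
      rw [pvDouble_pvM]
      have hk : k < pvTgt sz := by
        by_contra hc
        have : pvTgt sz ≤ k := by omega
        have := pvTgt_spec sz
        have : sz ≤ 2 ^ k := le_trans (pvTgt_spec sz) (Nat.pow_le_pow_right (by norm_num) (by omega))
        omega
      exact ih (k + 1) (by omega) (by omega)
    · rw [if_neg (by rw [pvM_length]; exact_mod_cast hlt)]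
      have : pvTgt sz ≤ k := pvTgt_le sz k (by omega)
      have : k = pvTgt sz := by omega
      rw [this]

lemma pvB_eq (size : Int) : build_bipolar_walsh_matrix_alt size = pvM size.toNat := by
  unfold build_bipolar_walsh_matrix_alt
  by_cases h : size ≤ 0
  · rw [if_pos h]
    have : size.toNat = 0 := by omega
    simp [this, pvM]
  · rw [if_neg h]
    set sz := size.toNat with hsz
    have hone : ([[ (1 : Int) ]] : List (List Int)) = pvM (2 ^ 0) := by
      simp [pvM, pvRow, pvVal]
      rw [pvOnes]
    have hcast : (sz : Int) = size := by omega
    rw [hone, ← hcast, pvGrow_eq sz sz 0 (Nat.zero_le _) (by simpa using pvTgt_le sz sz (Nat.le_of_lt Nat.lt_two_pow_self))]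
    have hle : sz ≤ 2 ^ pvTgt sz := pvTgt_spec sz
    rw [PySem.List.slice_to _ (by omega : (0:Int) ≤ (sz:Int))]
    simp only [Int.toNat_natCast]
    unfold pvM
    rw [← List.map_take, List.take_range, Nat.min_eq_left hle, List.map_map]
    apply List.map_congr_left
    intro x hx
    simp only [Function.comp_apply]
    rw [PySem.List.slice_to _ (by omega : (0:Int) ≤ (sz:Int))]
    simp only [Int.toNat_natCast]
    unfold pvRow
    rw [← List.map_take, List.take_range, Nat.min_eq_left hle]

-- ===== VERDICT (by name: the statement is the Claim_ definition above) =====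
theorem build_bipolar_walsh_matrix_spec : Claim_equal_build_bipolar_walsh_matrix := by
  intro size _
  unfold Spec_build_bipolar_walsh_matrix
  rw [pvA_eq, pvB_eq]
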